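-- pv_equiv track=rewrite | github.com/OpenChemistry/avogadrolibs | avogadro/qtplugins/scriptfileformats/formatScripts/cclib/parser/molproparser.py | create_atomic_orbital_names
-- ===== SOURCE A (Python) =====
-- import itertools
--
-- def create_atomic_orbital_names(orbitals):
--     """Generate all atomic orbital names that could be used by Molpro.
--
--     The names are returned in a dictionary, organized by subshell (S, P, D and so on).
--     """
--
--     # We can write out the first two manually, since there are not that many.
--     atomic_orbital_names = {
--         'S': ['s', '1s'],
--         'P': ['x', 'y', 'z', '2px', '2py', '2pz'],
--     }
--
--     # Although we could write out all names for the other subshells, it is better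
--     # to generate them if we need to expand further, since the number of functions quickly
--     # grows and there are both Cartesian and spherical variants to consider.
--     # For D orbitals, the Cartesian functions are xx, yy, zz, xy, xz and yz, and the
--     # spherical ones are called 3d0, 3d1-, 3d1+, 3d2- and 3d2+. For F orbitals, the Cartesians
--     # are xxx, xxy, xxz, xyy, ... and the sphericals are 4f0, 4f1-, 4f+ and so on.
--     for i, orb in enumerate(orbitals):
--
--         # Cartesian can be generated directly by combinations.
--         cartesian = list(map(''.join, list(itertools.combinations_with_replacement(['x', 'y', 'z'], i+2))))
--
--         # For spherical functions, we need to construct the names.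
--         pre = str(i+3) + orb.lower()
--         spherical = [pre + '0'] + [pre + str(j) + s for j in range(1, i+3) for s in ['-', '+']]
--         atomic_orbital_names[orb] = cartesian + spherical
--
--     return atomic_orbital_names
-- ===== SOURCE B (Python) =====
-- def create_atomic_orbital_names(orbitals):
--     """Generate all atomic orbital names that could be used by Molpro.
--
--     The names are returned in a dictionary, organized by subshell (S, P, D and so on).
--     """
--     names = {'S': ['s', '1s'], 'P': ['x', 'y', 'z', '2px', '2py', '2pz']}
--     for i, orb in enumerate(orbitals):
--         # Cartesian names by exponent counting: x^a y^b z^c with a+b+c = i+2,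
--         # enumerated with a, then b, descending — the lexicographic order.
--         n = i + 2
--         cart = []
--         for a in reversed(range(n + 1)):
--             for b in reversed(range(n - a + 1)):
--                 cart.append('x' * a + 'y' * b + 'z' * (n - a - b))
--         pre = str(i + 3) + orb.lower()
--         sph = [pre + '0']
--         for j in range(1, i + 3):
--             sph.append(pre + str(j) + '-')
--             sph.append(pre + str(j) + '+')
--         names[orb] = cart + sph
--     return names
-- ===== Notes on version B (the rewrite author's own statement) =====
-- stated objective: alternative
-- what changed: Cartesian orbital names are generated by counting exponent multiplicities (two descending loops over the x- and y-exponents, z fixed by the total degree) instead of itertools.combinations_with_replacement over index tuples, and the spherical names are appended pairwise in an explicit loop instead of a nested comprehension.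
import Mathlib
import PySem

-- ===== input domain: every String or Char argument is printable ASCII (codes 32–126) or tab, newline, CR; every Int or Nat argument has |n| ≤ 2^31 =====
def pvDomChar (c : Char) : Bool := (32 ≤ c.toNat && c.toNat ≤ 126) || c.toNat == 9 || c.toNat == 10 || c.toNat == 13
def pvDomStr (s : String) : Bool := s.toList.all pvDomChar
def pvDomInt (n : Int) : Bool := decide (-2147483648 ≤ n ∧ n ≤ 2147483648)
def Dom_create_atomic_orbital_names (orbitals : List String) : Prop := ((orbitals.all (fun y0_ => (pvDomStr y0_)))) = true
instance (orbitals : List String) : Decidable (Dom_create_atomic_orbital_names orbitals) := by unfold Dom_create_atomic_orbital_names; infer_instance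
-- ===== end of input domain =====

-- B replaces itertools.combinations_with_replacement by direct exponent-multiplicity counting
-- (descending loops over the x/y/z exponents); same return value, alternative algorithm.

-- ===== PORT A =====
-- Hand port of itertools.combinations_with_replacement(pool, r) (no PySem primitive exists for
-- it): exact, in CPython's lexicographic order, by the standard recursion.
def pvCwr {α : Type} (pool : List α) (r : Nat) : List (List α) :=
  match r, pool with
  | 0, _ => [[]]
  | _ + 1, [] => []
  | r + 1, c :: cs => (pvCwr (c :: cs) r).map (fun t => c :: t) ++ pvCwr cs (r + 1)
termination_by (r, pool.length)

def create_atomic_orbital_names (orbitals : List String) : List (String × List String) :=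
  -- the Python dict, in insertion order; returned as its items list per the type convention
  ((PySem.List.enumerate orbitals).foldl (fun d p =>
      let i := p.1
      let orb := p.2
      -- i is an enumerate index, hence ≥ 0: i.toNat + 2 is exactly Python's i + 2
      let cartesian := (pvCwr ["x", "y", "z"] (i.toNat + 2)).map (fun t => PySem.Str.join "" t)
      let pre := PySem.Int.toStr (i + 3) ++ PySem.Str.lower orb
      let spherical := [pre ++ "0"] ++
        (PySem.List.pyRange 1 (i + 3) 1).flatMap (fun j =>
          ["-", "+"].map (fun s => pre ++ PySem.Int.toStr j ++ s))
      d.insert orb (cartesian ++ spherical))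
    (PySem.Dict.ofList [("S", ["s", "1s"]), ("P", ["x", "y", "z", "2px", "2py", "2pz"])])).items

-- ===== PORT B =====
-- 'x' * a (string repetition) ported on the char-list side, as PYSEM.md prescribes for strings
def pvStrRep (c : Char) (k : Int) : String := String.ofList (PySem.List.pyRepeat [c] k)

def create_atomic_orbital_names_alt (orbitals : List String) : List (String × List String) :=
  ((PySem.List.enumerate orbitals).foldl (fun d p =>
      let i := p.1
      let orb := p.2
      let n := i + 2
      let cart := ((PySem.List.pyRange 0 (n + 1) 1).reverse).foldl (fun acc a =>
        ((PySem.List.pyRange 0 (n - a + 1) 1).reverse).foldl (fun acc2 b =>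
          acc2 ++ [pvStrRep 'x' a ++ pvStrRep 'y' b ++ pvStrRep 'z' (n - a - b)]) acc) []
      let pre := PySem.Int.toStr (i + 3) ++ PySem.Str.lower orb
      let sph := (PySem.List.pyRange 1 (i + 3) 1).foldl (fun acc j =>
        (acc ++ [pre ++ PySem.Int.toStr j ++ "-"]) ++ [pre ++ PySem.Int.toStr j ++ "+"])
        [pre ++ "0"]
      d.insert orb (cart ++ sph))
    (PySem.Dict.ofList [("S", ["s", "1s"]), ("P", ["x", "y", "z", "2px", "2py", "2pz"])])).items

-- ===== PRECONDITION & SPEC =====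
def Spec_create_atomic_orbital_names (orbitals : List String) (out : List (String × List String)) : Prop := out = create_atomic_orbital_names_alt orbitals
instance (orbitals : List String) (out : List (String × List String)) : Decidable (Spec_create_atomic_orbital_names orbitals out) := by unfold Spec_create_atomic_orbital_names; infer_instance

-- ===== CLAIM (what is proved, stated in full; the proofs are below) =====
def Claim_equal_create_atomic_orbital_names : Prop := ∀ (orbitals : List String), Dom_create_atomic_orbital_names orbitals → Spec_create_atomic_orbital_names orbitals (create_atomic_orbital_names orbitals)

-- ===== LEMMAS AND PROOFS =====

-- [m, m-1, …, 0], the order both descending loops of B traverse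
def pvDesc (m : Nat) : List Nat := (List.range (m + 1)).reverse

theorem pvDesc_shift (m : Nat) : pvDesc (m + 1) = (pvDesc m).map (· + 1) ++ [0] := by
  simp [pvDesc, List.range_succ_eq_map, List.map_reverse, Nat.succ_eq_add_one]

theorem mem_pvDesc {a m : Nat} (h : a ∈ pvDesc m) : a ≤ m := by
  simp [pvDesc, List.mem_range] at h; omega

theorem pvCwr_z (n : Nat) : pvCwr ['z'] n = [List.replicate n 'z'] := by
  induction n with
  | zero => simp [pvCwr]
  | succ n ih => rw [pvCwr, ih]; simp [pvCwr, List.replicate_succ]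

theorem pvCwr_yz (n : Nat) :
    pvCwr ['y', 'z'] n =
      (pvDesc n).map (fun b => List.replicate b 'y' ++ List.replicate (n - b) 'z') := by
  induction n with
  | zero => simp [pvCwr, pvDesc]
  | succ n ih =>
    rw [pvCwr, ih, pvCwr_z]
    conv_rhs => rw [pvDesc_shift]
    simp only [List.map_append, List.map_map]
    congr 1
    · apply List.map_congr_left
      intro b hb
      have hbn := mem_pvDesc hb
      have h1 : n + 1 - (b + 1) = n - b := by omega
      simp [Function.comp, List.replicate_succ]

theorem pvCwr_xyz (n : Nat) :
    pvCwr ['x', 'y', 'z'] n =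
      (pvDesc n).flatMap (fun a => (pvDesc (n - a)).map (fun b =>
        List.replicate a 'x' ++ List.replicate b 'y' ++ List.replicate (n - a - b) 'z')) := by
  induction n with
  | zero => simp [pvCwr, pvDesc]
  | succ n ih =>
    rw [pvCwr, ih, pvCwr_yz]
    conv_rhs => rw [pvDesc_shift]
    simp only [List.flatMap_append, List.flatMap_map, List.map_flatMap]
    congr 1
    · apply List.flatMap_congr
      intro a ha
      have han := mem_pvDesc ha
      have h1 : n + 1 - (a + 1) = n - a := by omega
      rw [h1, List.map_map]
      apply List.map_congr_left
      intro b hb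
      have hbn := mem_pvDesc hb
      have h2 : n + 1 - (a + 1) - b = n - a - b := by omega
      simp [Function.comp, List.replicate_succ]
    · simp

theorem pyRange_rev (m : Nat) :
    (PySem.List.pyRange 0 ((m : Int) + 1) 1).reverse = (pvDesc m).map (Nat.cast : Nat → Int) := by
  rw [PySem.List.pyRange_one]
  have h : (((m : Int) + 1 - 0)).toNat = m + 1 := by omega
  rw [h]
  simp only [zero_add]
  unfold pvDesc
  exact List.map_reverse.symm
theorem joinSingles (cs : List Char) :
    PySem.Str.join "" (cs.map (fun c => String.ofList [c])) = String.ofList cs := by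
  apply String.toList_inj.mp
  simp only [PySem.Str.join, List.map_map, Function.comp_def, String.toList_ofList,
    String.toList_empty]
  exact PySem.Chars.join_nil_singletons cs

theorem pvCwr_map {α β : Type} (f : α → β) (pool : List α) (r : Nat) :
    pvCwr (pool.map f) r = (pvCwr pool r).map (List.map f) := by
  induction pool, r using pvCwr.induct with
  | case1 => simp [pvCwr]
  | case2 r => simp [pvCwr]
  | case3 r c cs ih1 ih2 => rw [List.map_cons, pvCwr, pvCwr, ← List.map_cons, ih1, ih2]; simp

theorem cartA_eq (n : Nat) :
    (pvCwr ["x", "y", "z"] n).map (fun t => PySem.Str.join "" t) =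
      (pvCwr ['x', 'y', 'z'] n).map String.ofList := by
  have h : (["x", "y", "z"] : List String) =
      (['x', 'y', 'z'] : List Char).map (fun c => String.ofList [c]) := by decide
  rw [h, pvCwr_map, List.map_map]
  apply List.map_congr_left
  intro t _
  exact joinSingles t

theorem cartB_eq (m : Nat) :
    ((PySem.List.pyRange 0 ((m : Int) + 1) 1).reverse).foldl (fun acc a =>
        ((PySem.List.pyRange 0 ((m : Int) - a + 1) 1).reverse).foldl (fun acc2 b =>
          acc2 ++ [pvStrRep 'x' a ++ pvStrRep 'y' b ++ pvStrRep 'z' ((m : Int) - a - b)]) acc) [] =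
      (pvCwr ['x', 'y', 'z'] m).map String.ofList := by
  rw [PySem.List.foldl_congr_mem ((PySem.List.pyRange 0 ((m : Int) + 1) 1).reverse)
      (fun acc a =>
        ((PySem.List.pyRange 0 ((m : Int) - a + 1) 1).reverse).foldl (fun acc2 b =>
          acc2 ++ [pvStrRep 'x' a ++ pvStrRep 'y' b ++ pvStrRep 'z' ((m : Int) - a - b)]) acc)
      (fun acc a => acc ++
        ((PySem.List.pyRange 0 ((m : Int) - a + 1) 1).reverse).map (fun b =>
          pvStrRep 'x' a ++ pvStrRep 'y' b ++ pvStrRep 'z' ((m : Int) - a - b)))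
      []
      (by intro acc a _; simp only [PySem.List.foldl_append_singleton_eq_map])]
  rw [PySem.List.foldl_append_eq_flatMap, pyRange_rev m, pvCwr_xyz m]
  simp only [List.flatMap_map, List.map_flatMap, List.map_map, List.nil_append]
  apply List.flatMap_congr
  intro a ha
  have ham := mem_pvDesc ha
  have h1 : (m : Int) - (a : Int) + 1 = ((m - a : Nat) : Int) + 1 := by omega
  rw [Function.comp_def, h1, pyRange_rev, List.map_map]
  apply List.map_congr_left
  intro b hb
  have hbm := mem_pvDesc hb
  have h2 : ((m : Int) - (a : Int) - (b : Int)).toNat = m - a - b := by omega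
  apply String.toList_inj.mp
  simp [pvStrRep, PySem.List.pyRepeat_singleton, h2]

theorem sph_eq (pre : String) (t : Int) :
    (PySem.List.pyRange 1 t 1).foldl (fun acc j =>
        (acc ++ [pre ++ PySem.Int.toStr j ++ "-"]) ++ [pre ++ PySem.Int.toStr j ++ "+"])
      [pre ++ "0"] =
      [pre ++ "0"] ++ (PySem.List.pyRange 1 t 1).flatMap (fun j =>
        ["-", "+"].map (fun s => pre ++ PySem.Int.toStr j ++ s)) := by
  rw [PySem.List.foldl_congr_mem (PySem.List.pyRange 1 t 1)
      (fun acc j => (acc ++ [pre ++ PySem.Int.toStr j ++ "-"]) ++ [pre ++ PySem.Int.toStr j ++ "+"])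
      (fun acc j => acc ++ [pre ++ PySem.Int.toStr j ++ "-", pre ++ PySem.Int.toStr j ++ "+"])
      [pre ++ "0"]
      (by intro acc j _; simp)]
  rw [PySem.List.foldl_append_eq_flatMap]
  simp [List.map]

-- ===== VERDICT (by name: the statement is the Claim_ definition above) =====
theorem create_atomic_orbital_names_spec : Claim_equal_create_atomic_orbital_names := by
  unfold Claim_equal_create_atomic_orbital_names
  intro orbitals _
  unfold Spec_create_atomic_orbital_names create_atomic_orbital_names create_atomic_orbital_names_alt
  congr 1
  apply PySem.List.foldl_congr_mem
  intro d p hp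
  obtain ⟨k, hk, rfl⟩ := (PySem.List.mem_enumerate_iff _ _ _).mp hp
  simp only [zero_add]
  have e2 : (((k : Int)).toNat + 2) = k + 2 := by omega
  have e3 : ((k : Int) + 2) = (((k + 2 : Nat)) : Int) := by push_cast; ring
  rw [e2, e3, cartA_eq (k + 2), cartB_eq (k + 2), sph_eq]
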